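-- pv_equiv track=rewrite | github.com/establishingsecurity/CAT | cat/rsa/batch_gcd.py | _build_product_tree_1
-- ===== SOURCE A (Python) =====
-- import functools
-- import operator
--
-- def _build_product_tree_1(xs):
--
--     if not xs:
--         return [[0]]
--
--     tree = [xs]
--
--     while len(tree[-1]) != 1:
--         tree.append([
--             functools.reduce(operator.mul, tree[-1][2 * i : 2 * i + 2])
--             for i in range((len(tree[-1]) + 1) // 2)
--         ])
--
--     return tree
-- ===== SOURCE B (Python) =====
-- def _chunks(xs, size):
--     out = []
--     while xs:
--         out.append(xs[:size])
--         xs = xs[size:]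
--     return out
--
-- def _prod(c):
--     if len(c) == 1:
--         return c[0]
--     m = len(c) // 2
--     return _prod(c[:m]) * _prod(c[m:])
--
-- def _build_product_tree_1(xs):
--     if not xs:
--         return [[0]]
--     tree = []
--     size = 1
--     while True:
--         level = [_prod(c) for c in _chunks(xs, size)]
--         tree.append(level)
--         if len(level) == 1:
--             break
--         size *= 2
--     return tree
-- ===== Notes on version B (the rewrite author's own statement) =====
-- stated objective: alternative
-- what changed: B rebuilds every tree level directly from the base list by chopping it into 2^k-sized chunks and taking each chunk's product by balanced recursive halving, instead of pairwise-multiplying the previous level.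
import Mathlib
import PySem

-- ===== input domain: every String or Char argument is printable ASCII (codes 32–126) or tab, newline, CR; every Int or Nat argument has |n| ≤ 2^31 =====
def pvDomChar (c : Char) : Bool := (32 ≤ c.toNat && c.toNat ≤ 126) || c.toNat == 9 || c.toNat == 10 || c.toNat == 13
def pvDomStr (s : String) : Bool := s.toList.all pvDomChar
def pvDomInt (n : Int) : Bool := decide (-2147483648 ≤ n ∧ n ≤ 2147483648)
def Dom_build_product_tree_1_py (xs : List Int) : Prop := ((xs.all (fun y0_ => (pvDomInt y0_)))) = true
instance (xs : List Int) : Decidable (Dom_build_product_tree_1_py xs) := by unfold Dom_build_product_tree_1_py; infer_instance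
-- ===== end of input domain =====

-- B rebuilds each tree level directly from the base list (2^k-sized chunks, each reduced by
-- multiplication) instead of pairwise-multiplying the previous level; alternative decomposition.


-- ===== PORT A =====
-- functools.reduce(operator.mul, l); [] is unreachable here (reduce would raise, but every
-- slice fed to it in A is nonempty), so the [] branch's value is irrelevant.
def reduceMulA : List Int → Int
  | [] => 0
  | x :: t => t.foldl (· * ·) x

-- one body of A's while loop: [reduce(mul, l[2*i : 2*i+2]) for i in range((len(l) + 1) // 2)]
def pairStepA (l : List Int) : List Int :=
  (PySem.List.pyRange 0 (PySem.Int.floordiv (PySem.List.len l + 1) 2) 1).map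
    (fun i => reduceMulA (PySem.List.slice l (some (2 * i)) (some (2 * i + 2))))

-- A's while loop, returning the levels appended after the first; the fuel only makes the
-- recursion total (each iteration at least halves the level, so fuel = initial length suffices).
def loopA : Nat → List Int → List (List Int)
  | 0, _ => []
  | f + 1, l =>
    if l.length ≠ 1 then
      let nxt := pairStepA l
      nxt :: loopA f nxt
    else []

def build_product_tree_1_py (xs : List Int) : List (List Int) :=
  if xs = [] then [[0]] else xs :: loopA xs.length xs

-- ===== PORT B =====
-- _prod(c) of Source B: balanced product by recursive halving; [] is unreachable (chunks are
-- nonempty, and Python's _prod would recurse forever on []), its value is irrelevant.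
def bprodB : List Int → Int
  | [] => 0
  | [x] => x
  | x :: y :: t =>
    bprodB ((x :: y :: t).take ((x :: y :: t).length / 2)) *
      bprodB ((x :: y :: t).drop ((x :: y :: t).length / 2))
termination_by c => c.length
decreasing_by all_goals simp; omega

-- _chunks(xs, size) of Source B; the chunk size is carried as s = size-1 so the recursion is
-- visibly decreasing: (x :: t.take s) = (x::t).take (s+1) and t.drop s = (x::t).drop (s+1).
def chunksB (s : Nat) : List Int → List (List Int)
  | [] => []
  | x :: t => (x :: t.take s) :: chunksB s (t.drop s)
termination_by l => l.length
decreasing_by simp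

-- [_prod(c) for c in _chunks(xs, size)]
def levelB (s : Nat) (xs : List Int) : List Int :=
  (chunksB s xs).map bprodB

-- Source B's while True loop; level k uses size 2^k, carried as s with size = s+1 (doubling the
-- size is s' = 2*s+1); the fuel only makes the recursion total (fuel = len(xs) suffices).
def loopB : Nat → Nat → List Int → List (List Int)
  | 0, _, _ => []
  | f + 1, s, xs =>
    let lv := levelB s xs
    if lv.length = 1 then [lv] else lv :: loopB f (2 * s + 1) xs

def build_product_tree_1_py_alt (xs : List Int) : List (List Int) :=
  if xs = [] then [[0]] else loopB xs.length 0 xs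

-- ===== PRECONDITION & SPEC =====
def Spec_build_product_tree_1_py (xs : List Int) (out : List (List Int)) : Prop := out = build_product_tree_1_py_alt xs
instance (xs : List Int) (out : List (List Int)) : Decidable (Spec_build_product_tree_1_py xs out) := by unfold Spec_build_product_tree_1_py; infer_instance

-- ===== CLAIM (what is proved, stated in full; the proofs are below) =====
def Claim_equal_build_product_tree_1_py : Prop := ∀ (xs : List Int), Dom_build_product_tree_1_py xs → Spec_build_product_tree_1_py xs (build_product_tree_1_py xs)

-- ===== LEMMAS AND PROOFS =====

-- mathematical form of one pairing step
def pairsR : List Int → List Int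
  | [] => []
  | [a] => [a]
  | a :: b :: t => (a * b) :: pairsR t

theorem pairsR_length (l : List Int) : (pairsR l).length = (l.length + 1) / 2 := by
  induction l using pairsR.induct with
  | case1 => simp [pairsR]
  | case2 a => simp [pairsR]
  | case3 a b t ih => simp [pairsR, ih]; omega

-- the product tree from a given level downwards
def treeT (l : List Int) : List (List Int) :=
  if _h : l.length ≤ 1 then [l] else l :: treeT (pairsR l)
termination_by l.length
decreasing_by rw [pairsR_length]; omega

theorem pairStepA_nil : pairStepA [] = [] := by rfl

theorem pairStepA_single (a : Int) : pairStepA [a] = [a] := by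
  unfold pairStepA
  have h : PySem.Int.floordiv (PySem.List.len [a] + 1) 2 = 1 := by
    simp only [PySem.List.len_eq, List.length_cons, List.length_nil]
    decide
  rw [h, show PySem.List.pyRange 0 1 1 = [0] from rfl]
  simp only [List.map_cons, List.map_nil]
  norm_num
  rfl

theorem pairStepA_cons (a b : Int) (t : List Int) :
    pairStepA (a :: b :: t) = (a * b) :: pairStepA t := by
  have hfd : PySem.Int.floordiv (PySem.List.len (a :: b :: t) + 1) 2
      = (((t.length + 1) / 2 + 1 : Nat) : Int) := by
    simp only [PySem.List.len_eq, List.length_cons]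
    rw [PySem.Int.floordiv_eq_ediv_of_pos (by omega)]
    push_cast
    omega
  have hfd2 : PySem.Int.floordiv (PySem.List.len t + 1) 2 = (((t.length + 1) / 2 : Nat) : Int) := by
    simp only [PySem.List.len_eq]
    rw [PySem.Int.floordiv_eq_ediv_of_pos (by omega)]
    omega
  unfold pairStepA
  rw [hfd, hfd2, PySem.List.pyRange_one, PySem.List.pyRange_one]
  simp only [sub_zero, Int.toNat_natCast, List.map_map, List.range_succ_eq_map, List.map_cons]
  congr 1
  case e_tail =>
    apply List.map_congr_left
    intro k _
    simp only [Function.comp_apply, Nat.succ_eq_add_one]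
    have h1 : (2 : Int) * (0 + ((k + 1 : Nat) : Int)) = ((2 * k + 2 : Nat) : Int) := by push_cast; ring
    have h2 : ((2 * k + 2 : Nat) : Int) + 2 = ((2 * k + 4 : Nat) : Int) := by push_cast; ring
    have h3 : (2 : Int) * (0 + (k : Int)) = ((2 * k : Nat) : Int) := by push_cast; ring
    have h4 : ((2 * k : Nat) : Int) + 2 = ((2 * k + 2 : Nat) : Int) := by push_cast; ring
    rw [h1, h2, h3, h4, PySem.List.slice_natCast, PySem.List.slice_natCast]
    have hd : (a :: b :: t).drop (2 * k + 2) = t.drop (2 * k) := by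
      have : 2 * k + 2 = (2 * k) + 1 + 1 := by omega
      rw [this, List.drop_succ_cons, List.drop_succ_cons]
    rw [hd]
    have h5 : 2 * k + 4 - (2 * k + 2) = 2 := by omega
    have h6 : 2 * k + 2 - 2 * k = 2 := by omega
    rw [h5, h6]

theorem pairStepA_eq (l : List Int) : pairStepA l = pairsR l := by
  induction l using pairsR.induct with
  | case1 => exact pairStepA_nil
  | case2 a => exact pairStepA_single a
  | case3 a b t ih => rw [pairStepA_cons, ih]; rfl

theorem bprodB_eq_prod (c : List Int) : bprodB c = if c = [] then 0 else c.prod := by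
  induction c using bprodB.induct with
  | case1 => simp [bprodB]
  | case2 x => simp [bprodB]
  | case3 x y t ih1 ih2 =>
    rw [bprodB, ih1, ih2]
    have h1 : (x :: y :: t).take ((x :: y :: t).length / 2) ≠ [] := by
      simp [List.take_eq_nil_iff]
    have h2 : (x :: y :: t).drop ((x :: y :: t).length / 2) ≠ [] := by
      simp [List.drop_eq_nil_iff]
      omega
    rw [if_neg h1, if_neg h2, ← List.prod_append, List.take_append_drop]
    simp

-- key fact: one pairing step on the level of chunk size s+1 yields the level of chunk size 2s+2
theorem pairsR_level (s : Nat) : ∀ (n : Nat) (xs : List Int), xs.length ≤ n →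
    pairsR (levelB s xs) = levelB (2 * s + 1) xs := by
  intro n
  induction n with
  | zero =>
    intro xs h
    have hx : xs = [] := by cases xs with | nil => rfl | cons a t => simp at h
    subst hx; simp [levelB, chunksB, pairsR]
  | succ n ih =>
    intro xs h
    match xs with
    | [] => simp [levelB, chunksB, pairsR]
    | x :: t =>
      simp only [List.length_cons] at h
      cases hr : t.drop s with
      | nil =>
        have hts : t.length ≤ s := by
          have := congrArg List.length hr; simp at this; omega
        simp [levelB, chunksB, hr, pairsR, List.take_of_length_le hts,
          List.take_of_length_le (by omega : t.length ≤ 2 * s + 1),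
          List.drop_eq_nil_of_le (by omega : t.length ≤ 2 * s + 1)]
      | cons y r' =>
        have hr' : t.drop (s + 1) = r' := by
          have : t.drop (s + 1) = (t.drop s).drop 1 := by rw [List.drop_drop]
          rw [this, hr]; rfl
        have hlr' : r'.length + s + 1 ≤ t.length := by
          have := congrArg List.length hr; simp at this; omega
        have hdd : t.drop (2 * s + 1) = r'.drop s := by
          rw [← hr', List.drop_drop]; congr 1; omega
        have htake : t.take (2 * s + 1) = t.take s ++ (y :: r'.take s) := by
          have h1 : 2 * s + 1 = s + (s + 1) := by omega
          rw [h1, List.take_add, hr]; rfl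
        have hihlen : (r'.drop s).length ≤ n := by
          have hh : (r'.drop s).length = r'.length - s := by simp
          omega
        simp only [levelB, chunksB, hr, List.map_cons, pairsR]
        rw [hdd, htake]
        have hkey : bprodB (x :: t.take s) * bprodB (y :: r'.take s)
            = bprodB (x :: (t.take s ++ (y :: r'.take s))) := by
          rw [bprodB_eq_prod, bprodB_eq_prod, bprodB_eq_prod, if_neg (by simp), if_neg (by simp),
            if_neg (by simp)]
          simp only [List.prod_cons, List.prod_append]
          ring
        rw [hkey]
        have := ih (r'.drop s) hihlen
        simp only [levelB] at this
        rw [this]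

theorem levelB_ne_nil {xs : List Int} (h : xs ≠ []) (s : Nat) : levelB s xs ≠ [] := by
  cases xs with
  | nil => exact absurd rfl h
  | cons x t => simp [levelB, chunksB]

theorem levelB_zero (xs : List Int) : levelB 0 xs = xs := by
  induction xs with
  | nil => simp [levelB, chunksB]
  | cons x t ih =>
    simp only [levelB, chunksB, List.take_zero, List.drop_zero, List.map_cons] at *
    rw [ih]
    simp [bprodB]

theorem loopA_eq_treeT : ∀ (f : Nat) (l : List Int), l ≠ [] → l.length ≤ f + 1 →
    l :: loopA f l = treeT l := by
  intro f
  induction f with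
  | zero =>
    intro l hne hlen
    have h1 : l.length = 1 := by
      have := List.length_pos_of_ne_nil hne; omega
    rw [treeT]; simp [h1, loopA]
  | succ f ih =>
    intro l hne hlen
    rw [treeT]
    by_cases h1 : l.length = 1
    · simp [loopA, h1]
    · have h2 : 2 ≤ l.length := by
        have := List.length_pos_of_ne_nil hne; omega
      rw [dif_neg (by omega)]
      simp only [loopA, ne_eq, h1, not_false_iff, if_pos]
      rw [pairStepA_eq]
      congr 1
      apply ih
      · intro hc
        have hl := congrArg List.length hc
        rw [pairsR_length] at hl
        simp only [List.length_nil] at hl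
        omega
      · rw [pairsR_length]; omega

theorem loopB_eq_treeT : ∀ (f s : Nat) (xs : List Int), xs ≠ [] →
    (levelB s xs).length ≤ f → loopB f s xs = treeT (levelB s xs) := by
  intro f
  induction f with
  | zero =>
    intro s xs hne hlen
    have h1 := List.length_pos_of_ne_nil (levelB_ne_nil hne s)
    omega
  | succ f ih =>
    intro s xs hne hlen
    rw [treeT]
    by_cases h1 : (levelB s xs).length = 1
    · simp [loopB, h1]
    · have h0 : levelB s xs ≠ [] := levelB_ne_nil hne s
      have h2 : 2 ≤ (levelB s xs).length := by
        have := List.length_pos_of_ne_nil h0; omega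
      rw [dif_neg (by omega)]
      simp only [loopB, h1, if_false]
      congr 1
      rw [pairsR_level s xs.length xs le_rfl]
      apply ih _ _ hne
      have hlen2 : (levelB (2 * s + 1) xs).length = ((levelB s xs).length + 1) / 2 := by
        rw [← pairsR_level s xs.length xs le_rfl, pairsR_length]
      omega

-- ===== VERDICT (by name: the statement is the Claim_ definition above) =====
theorem build_product_tree_1_py_spec : Claim_equal_build_product_tree_1_py := by
  intro xs _
  unfold Spec_build_product_tree_1_py build_product_tree_1_py build_product_tree_1_py_alt
  by_cases hxs : xs = []
  · simp [hxs]
  · simp only [hxs, if_false]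
    rw [loopB_eq_treeT xs.length 0 xs hxs (by rw [levelB_zero]),
      levelB_zero, loopA_eq_treeT xs.length xs hxs (by omega)]
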